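-- pv_equiv track=rewrite | github.com/TedBarbier/CryptInsa | backend/cryptage/decrypt.py | lettre_en_commun
-- ===== SOURCE A (Python) =====
-- def lettre_en_commun(mots):   #mots est une liste de mots
--     commun=[]
--     for i in range(0,len(mots[0])):
--         lettre=mots[0][i]
--         for mot in mots:
--             if i>=len(mot) or mot[i]!=lettre:
--                 lettre=None
--                 break
--         if lettre is not None:
--             commun.append((lettre,i))
--     return commun
-- ===== SOURCE B (Python) =====
-- def lettre_en_commun(mots):
--     cands = list(enumerate(mots[0]))
--     for mot in mots[1:]:
--         cands = [(i, l) for (i, l) in cands if i < len(mot) and mot[i] == l]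
--     return [(l, i) for (i, l) in cands]
-- ===== Notes on version B (the rewrite author's own statement) =====
-- stated objective: alternative
-- what changed: word-major progressive filtering of an (index,letter) candidate list built from the first word, instead of A's position-major nested loop with a sentinel/break
import Mathlib
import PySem

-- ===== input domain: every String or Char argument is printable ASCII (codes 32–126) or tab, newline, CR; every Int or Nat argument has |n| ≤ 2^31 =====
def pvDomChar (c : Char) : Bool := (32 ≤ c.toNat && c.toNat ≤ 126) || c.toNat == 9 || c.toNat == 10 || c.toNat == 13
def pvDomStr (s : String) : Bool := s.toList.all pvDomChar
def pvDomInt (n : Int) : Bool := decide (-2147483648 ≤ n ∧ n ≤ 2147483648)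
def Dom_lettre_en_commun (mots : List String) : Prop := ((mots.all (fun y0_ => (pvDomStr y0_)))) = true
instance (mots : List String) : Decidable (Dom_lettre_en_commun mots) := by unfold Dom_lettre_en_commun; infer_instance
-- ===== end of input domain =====

-- B restructures A's position-major nested loop into a word-major progressive
-- filter of an (index, letter) candidate list; objective: alternative (same cost).

-- ===== PORT A =====
-- inner 'for mot in mots' loop with its break: returns none when 'lettre' was set to None
def lecInner (i : Int) (lettre : Char) : List String → Option Char
  | [] => some lettre
  | mot :: rest =>
    if i ≥ PySem.Str.len mot ∨ PySem.Str.pyGet? mot i ≠ some lettre then none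
    else lecInner i lettre rest

def lettre_en_commun (mots : List String) : List (String × Int) :=
  match PySem.List.pyGet? mots 0 with
  | none => []   -- mots[0] raises IndexError (outside Pre_)
  | some m0 =>
    (PySem.List.pyRange 0 (PySem.Str.len m0) 1).foldl
      (fun commun i =>
        match PySem.Str.pyGet? m0 i with
        | none => commun   -- unreachable: i in range(len(mots[0]))
        | some lettre =>
          match lecInner i lettre mots with
          | none => commun
          | some l => commun ++ [(String.ofList [l], i)]) []

-- ===== PORT B =====
def lettre_en_commun_alt (mots : List String) : List (String × Int) :=
  match PySem.List.pyGet? mots 0 with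
  | none => []   -- mots[0] raises IndexError (outside Pre_)
  | some m0 =>
    let cands0 : List (Int × Char) := PySem.List.enumerate m0.toList 0
    let cands := (PySem.List.slice mots (some 1) none).foldl
      (fun cs mot => cs.filter
        (fun c => decide (c.1 < PySem.Str.len mot) && (PySem.Str.pyGet? mot c.1 == some c.2)))
      cands0
    cands.map (fun c => (String.ofList [c.2], c.1))

-- ===== PRECONDITION & SPEC =====
-- Pre_ excludes only the empty list, on which Python A raises IndexError at mots[0]
def Pre_lettre_en_commun (mots : List String) : Prop := mots ≠ []
instance (mots : List String) : Decidable (Pre_lettre_en_commun mots) := by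
  unfold Pre_lettre_en_commun; infer_instance
def pvWitness_lettre_en_commun : List String := (["abc", "axc"])

def Spec_lettre_en_commun (mots : List String) (out : List (String × Int)) : Prop :=
  out = lettre_en_commun_alt mots
instance (mots : List String) (out : List (String × Int)) : Decidable (Spec_lettre_en_commun mots out) := by
  unfold Spec_lettre_en_commun; infer_instance

-- ===== CLAIM (what is proved, stated in full; the proofs are below) =====
def Claim_equal_lettre_en_commun : Prop :=
  ∀ (mots : List String), Dom_lettre_en_commun mots → Pre_lettre_en_commun mots →
    Spec_lettre_en_commun mots (lettre_en_commun mots)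

-- ===== LEMMAS AND PROOFS =====

-- the shared per-word test: position i exists in mot and holds letter l
def pvPred (i : Int) (l : Char) (mot : String) : Bool :=
  decide (i < PySem.Str.len mot) && (PySem.Str.pyGet? mot i == some l)

def pvAllPred (ms : List String) (i : Int) (l : Char) : Bool :=
  ms.all (fun mot => pvPred i l mot)

def pvEmit (i : Int) (l : Char) : String × Int := (String.ofList [l], i)

lemma lecInner_eq (i : Int) (l : Char) :
    ∀ ms : List String,
      lecInner i l ms = if ms.all (fun mot => pvPred i l mot) then some l else none := by
  intro ms
  induction ms with
  | nil => simp [lecInner]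
  | cons mot rest ih =>
    simp only [lecInner, List.all_cons]
    by_cases h1 : i < PySem.Str.len mot
    · by_cases h2 : PySem.Str.pyGet? mot i = some l
      · have hc : ¬ (i ≥ PySem.Str.len mot ∨ PySem.Str.pyGet? mot i ≠ some l) := by
          rintro (h | h)
          · omega
          · exact h h2
        have hp : pvPred i l mot = true := by
          simp only [pvPred, Bool.and_eq_true, decide_eq_true_eq, beq_iff_eq]
          exact ⟨h1, h2⟩
        rw [if_neg hc, ih]
        simp [hp]
      · have hc : i ≥ PySem.Str.len mot ∨ PySem.Str.pyGet? mot i ≠ some l := Or.inr h2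
        have hp : pvPred i l mot = false := by
          simp only [pvPred, Bool.and_eq_false_iff, beq_eq_false_iff_ne]
          exact Or.inr h2
        rw [if_pos hc]
        simp [hp]
    · have hc : i ≥ PySem.Str.len mot ∨ PySem.Str.pyGet? mot i ≠ some l := Or.inl (by omega)
      have hp : pvPred i l mot = false := by
        simp only [pvPred, Bool.and_eq_false_iff, decide_eq_false_iff_not, not_lt]
        exact Or.inl (by omega)
      rw [if_pos hc]
      simp [hp]

-- B's word-major fold of filters is one filter by the conjunction over all words
lemma foldl_filter_eq {α β : Type} (q : β → α → Bool) :
    ∀ (ms : List β) (cs : List α),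
      ms.foldl (fun cs mot => cs.filter (q mot)) cs
        = cs.filter (fun c => ms.all (fun mot => q mot c)) := by
  intro ms
  induction ms with
  | nil => intro cs; simp
  | cons m ms ih =>
    intro cs
    simp only [List.foldl_cons, ih, List.filter_filter, List.all_cons]
    exact List.filter_congr (fun a _ => by rw [Bool.and_comm])

-- elements of enumerate are in-range indexed letters
lemma mem_enumerate_spec (cs : List Char) :
    ∀ (s : Int) (p : Int × Char), p ∈ PySem.List.enumerate cs s →
      ∃ k : Nat, k < cs.length ∧ p.1 = s + k ∧ cs[k]? = some p.2 := by
  induction cs with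
  | nil => intro s p hp; simp [PySem.List.enumerate_nil] at hp
  | cons c cs ih =>
    intro s p hp
    rw [PySem.List.enumerate_cons] at hp
    rcases List.mem_cons.mp hp with h | h
    · exact ⟨0, by simp [h]⟩
    · obtain ⟨k, hk, h1, h2⟩ := ih (s + 1) p h
      refine ⟨k + 1, by simpa using Nat.succ_lt_succ hk, ?_, by simpa using h2⟩
      rw [h1]; push_cast; ring
-- A's position-major foldl is the filtered, mapped enumerate
lemma foldl_range_enum {β : Type} (g : Int → Char → Bool) (e : Int → Char → β) :
    ∀ (cs : List Char) (s : Int) (init : List β),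
      (List.range cs.length).foldl
        (fun acc k =>
          match cs[k]? with
          | none => acc
          | some l => if g (s + k) l then acc ++ [e (s + k) l] else acc) init
      = init ++ ((PySem.List.enumerate cs s).filter (fun c => g c.1 c.2)).map (fun c => e c.1 c.2) := by
  intro cs
  induction cs with
  | nil => intro s init; simp [PySem.List.enumerate_nil]
  | cons c cs ih =>
    intro s init
    rw [List.length_cons, List.range_succ_eq_map, List.foldl_cons, List.foldl_map]
    simp only [List.getElem?_cons_zero, Nat.succ_eq_add_one, List.getElem?_cons_succ,
      Nat.cast_add, Nat.cast_one, Nat.cast_zero, add_zero]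
    have harith : ∀ k : Nat, s + ((k : Int) + 1) = s + 1 + (k : Int) := by intro k; ring
    simp only [harith]
    rw [ih (s + 1)]
    rw [PySem.List.enumerate_cons]
    by_cases hg : g s c
    · simp [hg, List.append_assoc]
    · simp [hg]

-- ===== VERDICT (by name: the statement is the Claim_ definition above) =====
theorem lettre_en_commun_spec : Claim_equal_lettre_en_commun := by
  intro mots _ hpre
  unfold Spec_lettre_en_commun lettre_en_commun lettre_en_commun_alt
  cases mots with
  | nil => exact absurd rfl hpre
  | cons m0 rest =>
    simp only [PySem.List.pyGet?_zero_cons, PySem.List.slice_from_one, List.tail_cons]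
    rw [PySem.Str.len_eq, PySem.List.pyRange_zero_natCast, List.foldl_map]
    rw [foldl_filter_eq
      (fun mot (c : Int × Char) =>
        decide (c.1 < PySem.Str.len mot) && (PySem.Str.pyGet? mot c.1 == some c.2))
      rest (PySem.List.enumerate m0.toList 0)]
    have key := foldl_range_enum (pvAllPred (m0 :: rest)) pvEmit m0.toList 0 []
    simp only [zero_add, List.nil_append] at key
    have hA :
        (fun (commun : List (String × Int)) (k : Nat) =>
          match PySem.Str.pyGet? m0 (k : Int) with
          | none => commun
          | some lettre =>
            match lecInner (k : Int) lettre (m0 :: rest) with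
            | none => commun
            | some l => commun ++ [(String.ofList [l], (k : Int))])
        = (fun (acc : List (String × Int)) (k : Nat) =>
          match m0.toList[k]? with
          | none => acc
          | some l =>
            if pvAllPred (m0 :: rest) (k : Int) l then acc ++ [pvEmit (k : Int) l] else acc) := by
      funext commun k
      rw [PySem.Str.pyGet?_natCast]
      cases m0.toList[k]? with
      | none => rfl
      | some lettre =>
        simp only [lecInner_eq]
        by_cases hall : pvAllPred (m0 :: rest) (k : Int) lettre
        · rw [if_pos (by simpa [pvAllPred] using hall)]
          simp [hall, pvEmit]
        · rw [if_neg (by simpa [pvAllPred] using hall)]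
          simp [hall]
    rw [hA, key]
    have hfeq :
        (PySem.List.enumerate m0.toList 0).filter
            (fun c => pvAllPred (m0 :: rest) c.1 c.2)
          = (PySem.List.enumerate m0.toList 0).filter
            (fun c => rest.all (fun mot =>
              decide (c.1 < PySem.Str.len mot) && (PySem.Str.pyGet? mot c.1 == some c.2))) := by
      apply List.filter_congr
      intro c hc
      obtain ⟨k, hk, h1, h2⟩ := mem_enumerate_spec m0.toList 0 c hc
      have hck : c.1 = (k : Int) := by omega
      have hm0 : pvPred c.1 c.2 m0 = true := by
        simp only [pvPred, Bool.and_eq_true, decide_eq_true_eq, beq_iff_eq]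
        constructor
        · rw [PySem.Str.len_eq]; omega
        · rw [hck, PySem.Str.pyGet?_natCast, h2]
      simp only [pvAllPred, List.all_cons, hm0, Bool.true_and]
      rfl
    rw [hfeq]
    simp [pvEmit]
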